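-- pv_equiv track=rewrite | github.com/imminfo/hex | aggregate_sequences.py | make_best_pos_consensus
-- ===== SOURCE A (Python) =====
-- def make_best_pos_consensus(orig_seq, orig_num, seq_list):
--     res = ''
--     for i in range(len(orig_seq)):
--         d = {'A': 0, 'C': 0, 'G': 0, 'T': 0, 'N': 0}
--         d[orig_seq[i]] += orig_num
--         for seq, cnt in seq_list:
--             d[seq[i]] += cnt
--         d.pop('N')
--         res += max(d.items(), key = lambda x: x[1])[0]
--     return res
-- ===== SOURCE B (Python) =====
-- def make_best_pos_consensus(orig_seq, orig_num, seq_list):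
--     BASES = 'ACGT'
--
--     def bump(t, ch, w):
--         if ch == 'N':
--             return t
--         j = BASES.index(ch)
--         return t[:j] + (t[j] + w,) + t[j + 1:]
--
--     counts = [bump((0, 0, 0, 0), ch, orig_num) for ch in orig_seq]
--     for seq, cnt in seq_list:
--         counts = [bump(t, ch, cnt) for t, ch in zip(counts, seq)]
--     return ''.join(BASES[max(range(4), key=lambda j: t[j])] for t in counts)
-- ===== Notes on version B (the rewrite author's own statement) =====
-- stated objective: alternative
-- what changed: A rebuilds a fresh 5-key count dict for every position with the sequence scan nested inside; B builds one profile table (a 4-counter tuple per position, seeded from orig_seq) in a single pass over the sequences and then selects the first-maximal base per column in a separate pass.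
import Mathlib
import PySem

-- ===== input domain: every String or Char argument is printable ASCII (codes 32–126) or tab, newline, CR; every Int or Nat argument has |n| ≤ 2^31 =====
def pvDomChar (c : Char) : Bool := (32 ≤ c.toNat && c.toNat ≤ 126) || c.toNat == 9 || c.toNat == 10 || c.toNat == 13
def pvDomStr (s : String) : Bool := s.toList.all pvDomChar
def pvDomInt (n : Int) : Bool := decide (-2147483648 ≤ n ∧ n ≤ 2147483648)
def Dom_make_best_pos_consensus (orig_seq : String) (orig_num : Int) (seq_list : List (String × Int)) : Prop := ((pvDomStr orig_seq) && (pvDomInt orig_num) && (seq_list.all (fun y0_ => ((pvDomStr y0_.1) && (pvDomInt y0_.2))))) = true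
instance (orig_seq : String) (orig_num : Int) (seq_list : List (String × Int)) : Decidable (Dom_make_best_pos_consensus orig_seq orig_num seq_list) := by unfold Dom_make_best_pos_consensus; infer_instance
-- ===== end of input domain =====

-- B replaces A's per-position dict rebuild (positions outer, sequences inner) by one profile table
-- built in a single pass over the sequences, then a separate selection pass (objective: alternative).

-- ===== PORT A =====
-- A, step for step: for each position a fresh dict {'A','C','G','T','N'}, weighted counts, pop 'N',
-- max by value (first maximal).  The getD/pyGetD defaults only make the raising cases (KeyError /
-- IndexError / max of empty) total; Pre_ excludes exactly those inputs.
def make_best_pos_consensus (orig_seq : String) (orig_num : Int) (seq_list : List (String × Int)) : String :=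
  let cs := orig_seq.toList
  let res := (PySem.List.pyRange 0 (cs.length : Int) 1).foldl (fun (res : List Char) (i : Int) =>
    let d : PySem.Dict Char Int := PySem.Dict.mk [('A',0),('C',0),('G',0),('T',0),('N',0)]
    let k0 := PySem.List.pyGetD cs i ' '
    let d := d.insert k0 (d.getD k0 0 + orig_num)
    let d := seq_list.foldl (fun (d : PySem.Dict Char Int) (p : String × Int) =>
      let k := PySem.List.pyGetD p.1.toList i ' '
      d.insert k (d.getD k 0 + p.2)) d
    let d := d.erase 'N'
    match PySem.List.max? d.items (fun x => x.2) with
    | some p => res ++ [p.1]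
    | none => res) []
  String.mk res

-- ===== PORT B =====
-- bump t ch w : add w to the component of t indexed by ch in 'ACGT'; 'N' (and, for totality only,
-- any other char — excluded by Pre_, where Python B's BASES.index would raise) leaves t unchanged.
def pvBump (t : Int × Int × Int × Int) (ch : Char) (w : Int) : Int × Int × Int × Int :=
  if ch = 'N' then t
  else if ch = 'A' then (t.1 + w, t.2.1, t.2.2.1, t.2.2.2)
  else if ch = 'C' then (t.1, t.2.1 + w, t.2.2.1, t.2.2.2)
  else if ch = 'G' then (t.1, t.2.1, t.2.2.1 + w, t.2.2.2)
  else if ch = 'T' then (t.1, t.2.1, t.2.2.1, t.2.2.2 + w)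
  else t

-- BASES[max(range(4), key=lambda j: t[j])] : first index with maximal count, as a char.
def pvSelect (t : Int × Int × Int × Int) : Char :=
  if t.2.1 ≤ t.1 ∧ t.2.2.1 ≤ t.1 ∧ t.2.2.2 ≤ t.1 then 'A'
  else if t.2.2.1 ≤ t.2.1 ∧ t.2.2.2 ≤ t.2.1 then 'C'
  else if t.2.2.2 ≤ t.2.2.1 then 'G'
  else 'T'

def make_best_pos_consensus_alt (orig_seq : String) (orig_num : Int) (seq_list : List (String × Int)) : String :=
  let counts := orig_seq.toList.map (fun ch => pvBump (0, 0, 0, 0) ch orig_num)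
  let counts := seq_list.foldl (fun (cts : List (Int × Int × Int × Int)) (p : String × Int) =>
    List.zipWith (fun t ch => pvBump t ch p.2) cts p.1.toList) counts
  String.mk (counts.map pvSelect)

-- ===== PRECONDITION & SPEC =====
-- Pre_ is exactly A's non-raising domain: every character A inspects is one of A,C,G,T,N (else
-- KeyError) and every sequence reaches orig_seq's length (else IndexError); characters of a
-- sequence beyond orig_seq's length are never inspected and stay unconstrained.
def pvBase (c : Char) : Bool := c == 'A' || c == 'C' || c == 'G' || c == 'T' || c == 'N'
def Pre_make_best_pos_consensus (orig_seq : String) (orig_num : Int) (seq_list : List (String × Int)) : Prop :=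
  (orig_seq.toList.all pvBase &&
   seq_list.all (fun p => decide (orig_seq.toList.length ≤ p.1.toList.length) &&
     (p.1.toList.take orig_seq.toList.length).all pvBase)) = true
instance (orig_seq : String) (orig_num : Int) (seq_list : List (String × Int)) : Decidable (Pre_make_best_pos_consensus orig_seq orig_num seq_list) := by unfold Pre_make_best_pos_consensus; infer_instance

def pvWitness_make_best_pos_consensus : String × Int × (List (String × Int)) := ("ACN", 2, [("GGA", 1)])

def Spec_make_best_pos_consensus (orig_seq : String) (orig_num : Int) (seq_list : List (String × Int)) (out : String) : Prop := out = make_best_pos_consensus_alt orig_seq orig_num seq_list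
instance (orig_seq : String) (orig_num : Int) (seq_list : List (String × Int)) (out : String) : Decidable (Spec_make_best_pos_consensus orig_seq orig_num seq_list out) := by unfold Spec_make_best_pos_consensus; infer_instance

-- ===== CLAIM (what is proved, stated in full; the proofs are below) =====
def Claim_equal_make_best_pos_consensus : Prop := ∀ (orig_seq : String) (orig_num : Int) (seq_list : List (String × Int)), Dom_make_best_pos_consensus orig_seq orig_num seq_list → Pre_make_best_pos_consensus orig_seq orig_num seq_list → Spec_make_best_pos_consensus orig_seq orig_num seq_list (make_best_pos_consensus orig_seq orig_num seq_list)

-- ===== LEMMAS AND PROOFS =====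
-- the fold over seq_list updating one column, and the per-position column both sides compute
def pvFold (L : List (String × Int)) (i : Nat) (init : Int × Int × Int × Int) : Int × Int × Int × Int :=
  L.foldl (fun t p => pvBump t (p.1.toList.getD i ' ') p.2) init

def pvCol (cs : List Char) (orig_num : Int) (seq_list : List (String × Int)) (i : Nat) : Int × Int × Int × Int :=
  pvFold seq_list i (pvBump (0, 0, 0, 0) (cs.getD i ' ') orig_num)

-- appending one sequence to B's table updates every column by one pvBump
lemma pv_zip_step (n : Nat) (g : Nat → Int × Int × Int × Int) (s : List Char) (w : Int)
    (hs : n ≤ s.length) :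
    List.zipWith (fun t ch => pvBump t ch w) ((List.range n).map g) s
      = (List.range n).map (fun i => pvBump (g i) (s.getD i ' ') w) := by
  apply List.ext_getElem
  · simp [Nat.min_eq_left hs]
  · intro i h1 h2
    simp only [List.getElem_zipWith, List.getElem_map, List.getElem_range]
    have hi : i < n := by simpa using h2
    rw [List.getD_eq_getElem s ' ' (by omega)]

-- B's table, built sequence-by-sequence, is the list of column folds
lemma pv_table (L : List (String × Int)) (n : Nat) (g : Nat → Int × Int × Int × Int)
    (hL : ∀ p ∈ L, n ≤ p.1.toList.length) :
    L.foldl (fun cts p => List.zipWith (fun t ch => pvBump t ch p.2) cts p.1.toList)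
        ((List.range n).map g)
      = (List.range n).map (fun i => pvFold L i (g i)) := by
  induction L generalizing g with
  | nil => simp [pvFold]
  | cons p L ih =>
    simp only [List.foldl_cons]
    rw [pv_zip_step n g p.1.toList p.2 (hL p (by simp))]
    exact ih (fun i => pvBump (g i) (p.1.toList.getD i ' ') p.2)
      (fun q hq => hL q (by simp [hq]))

lemma pv_map_getD (cs : List Char) (f : Char → Int × Int × Int × Int) :
    cs.map f = (List.range cs.length).map (fun i => f (cs.getD i ' ')) := by
  apply List.ext_getElem
  · simp
  · intro i h1 h2
    simp only [List.getElem_map, List.getElem_range]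
    rw [List.getD_eq_getElem cs ' ' (by simpa using h2)]

-- one dict update step keeps the literal five-key shape; the ACGT slots follow pvBump
lemma pv_dict_step (a c g t m w : Int) (k : Char)
    (hk : k ∈ (['A','C','G','T','N'] : List Char)) :
    ((PySem.Dict.mk [('A',a),('C',c),('G',g),('T',t),('N',m)]).insert k
        ((PySem.Dict.mk [('A',a),('C',c),('G',g),('T',t),('N',m)]).getD k 0 + w))
      = PySem.Dict.mk [('A',(pvBump (a,c,g,t) k w).1),('C',(pvBump (a,c,g,t) k w).2.1),
                       ('G',(pvBump (a,c,g,t) k w).2.2.1),('T',(pvBump (a,c,g,t) k w).2.2.2),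
                       ('N', if k = 'N' then m + w else m)] := by
  fin_cases hk <;> rfl

-- A's inner loop over seq_list, on such a dict, is the column fold plus some 'N' count
lemma pv_dict_loop (L : List (String × Int)) (i : Nat)
    (hL : ∀ p ∈ L, p.1.toList.getD i ' ' ∈ (['A','C','G','T','N'] : List Char))
    (a c g t m : Int) :
    ∃ m', L.foldl (fun (d : PySem.Dict Char Int) (p : String × Int) =>
        d.insert (p.1.toList.getD i ' ') (d.getD (p.1.toList.getD i ' ') 0 + p.2))
        (PySem.Dict.mk [('A',a),('C',c),('G',g),('T',t),('N',m)])
      = PySem.Dict.mk [('A',(pvFold L i (a,c,g,t)).1),('C',(pvFold L i (a,c,g,t)).2.1),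
                       ('G',(pvFold L i (a,c,g,t)).2.2.1),('T',(pvFold L i (a,c,g,t)).2.2.2),
                       ('N',m')] := by
  induction L generalizing a c g t m with
  | nil => exact ⟨m, rfl⟩
  | cons p L ih =>
    simp only [List.foldl_cons]
    rw [pv_dict_step a c g t m p.2 _ (hL p (by simp))]
    exact ih (fun q hq => hL q (by simp [hq])) _ _ _ _ _

-- erasing 'N' from the literal five-key dict leaves the four ACGT items
lemma pv_erase (b1 b2 b3 b4 m' : Int) :
    (PySem.Dict.erase
        (PySem.Dict.mk [('A',b1),('C',b2),('G',b3),('T',b4),('N',m')]) 'N').items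
      = [('A',b1),('C',b2),('G',b3),('T',b4)] := rfl

-- first maximal of the four items is pvSelect (with the maximal value as its count)
lemma pv_max4 (a c g t : Int) :
    PySem.List.max? [('A',a),('C',c),('G',g),('T',t)] (fun x => x.2)
      = some (pvSelect (a, c, g, t), max (max (max a c) g) t) := by
  simp only [PySem.List.max?, List.foldl]
  by_cases h1 : a < c
  · simp only [if_pos h1]
    by_cases h2 : c < g
    · simp only [if_pos h2]
      by_cases h3 : g < t
      · simp only [if_pos h3, pvSelect]; split_ifs <;> simp_all <;> omega
      · simp only [if_neg h3, pvSelect]; split_ifs <;> simp_all <;> omega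
    · simp only [if_neg h2]
      by_cases h3 : c < t
      · simp only [if_pos h3, pvSelect]; split_ifs <;> simp_all <;> omega
      · simp only [if_neg h3, pvSelect]; split_ifs <;> simp_all <;> omega
  · simp only [if_neg h1]
    by_cases h2 : a < g
    · simp only [if_pos h2]
      by_cases h3 : g < t
      · simp only [if_pos h3, pvSelect]; split_ifs <;> simp_all <;> omega
      · simp only [if_neg h3, pvSelect]; split_ifs <;> simp_all <;> omega
    · simp only [if_neg h2]
      by_cases h3 : a < t
      · simp only [if_pos h3, pvSelect]; split_ifs <;> simp_all <;> omega
      · simp only [if_neg h3, pvSelect]; split_ifs <;> simp_all <;> omega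

-- A's whole loop body at position i appends exactly pvSelect of the column fold
lemma pv_body (cs : List Char) (orig_num : Int) (seq_list : List (String × Int)) (i : Nat)
    (hc : cs.getD i ' ' ∈ (['A','C','G','T','N'] : List Char))
    (hL : ∀ p ∈ seq_list, p.1.toList.getD i ' ' ∈ (['A','C','G','T','N'] : List Char))
    (res : List Char) :
    (match PySem.List.max?
        ((PySem.Dict.erase
          (seq_list.foldl (fun (d : PySem.Dict Char Int) (p : String × Int) =>
              d.insert (p.1.toList.getD i ' ') (d.getD (p.1.toList.getD i ' ') 0 + p.2))
            ((PySem.Dict.mk [('A',0),('C',0),('G',0),('T',0),('N',0)]).insert (cs.getD i ' ')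
              ((PySem.Dict.mk [('A',0),('C',0),('G',0),('T',0),('N',0)]).getD (cs.getD i ' ') 0
                + orig_num)))
          'N').items)
        (fun x => x.2) with
      | some p => res ++ [p.1]
      | none => res)
      = res ++ [pvSelect (pvCol cs orig_num seq_list i)] := by
  rw [pv_dict_step 0 0 0 0 0 orig_num _ hc]
  obtain ⟨m', hm⟩ := pv_dict_loop seq_list i hL
    (pvBump (0,0,0,0) (cs.getD i ' ') orig_num).1
    (pvBump (0,0,0,0) (cs.getD i ' ') orig_num).2.1
    (pvBump (0,0,0,0) (cs.getD i ' ') orig_num).2.2.1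
    (pvBump (0,0,0,0) (cs.getD i ' ') orig_num).2.2.2
    (if cs.getD i ' ' = 'N' then 0 + orig_num else 0)
  rw [hm, pv_erase, pv_max4]
  rfl

-- ===== VERDICT (by name: the statement is the Claim_ definition above) =====
theorem make_best_pos_consensus_spec : Claim_equal_make_best_pos_consensus := by
  intro orig_seq orig_num seq_list _ hpre
  simp only [Pre_make_best_pos_consensus, Bool.and_eq_true, List.all_eq_true,
    decide_eq_true_eq] at hpre
  obtain ⟨hall0, hseq⟩ := hpre
  have hmem : ∀ c, pvBase c = true → c ∈ (['A','C','G','T','N'] : List Char) := by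
    intro c h
    simp only [pvBase, Bool.or_eq_true, beq_iff_eq] at h
    simp only [List.mem_cons, List.not_mem_nil, or_false]
    tauto
  have hall : ∀ c ∈ orig_seq.toList, c ∈ (['A','C','G','T','N'] : List Char) :=
    fun c hc => hmem c (hall0 c hc)
  unfold Spec_make_best_pos_consensus make_best_pos_consensus make_best_pos_consensus_alt
  simp only []
  set cs := orig_seq.toList with hcs
  -- A side: range over the positions; each step appends pvSelect of the column fold
  rw [PySem.List.pyRange_one, List.foldl_map]
  simp only [sub_zero, Int.toNat_natCast]
  rw [PySem.List.foldl_congr_mem _ _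
        (fun (res : List Char) (k : Nat) => res ++ [pvSelect (pvCol cs orig_num seq_list k)])
        _ ?_]
  · rw [PySem.List.foldl_append_singleton_eq_map]
    -- B side: the profile table is the list of column folds
    rw [pv_map_getD cs (fun ch => pvBump (0,0,0,0) ch orig_num)]
    rw [pv_table seq_list cs.length _ (fun p hp => (hseq p hp).1)]
    simp [pvCol, pvFold]
    rfl
  · intro acc k hk
    have hkn : k < cs.length := List.mem_range.mp hk
    simp only [zero_add, PySem.List.pyGetD_natCast]
    apply pv_body
    · rw [List.getD_eq_getElem cs ' ' hkn]; exact hall _ (List.getElem_mem hkn)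
    · intro p hp
      have hlen := (hseq p hp).1
      rw [List.getD_eq_getElem p.1.toList ' ' (by omega)]
      refine hmem _ ((hseq p hp).2 _ ?_)
      have h1 : k < (List.take cs.length p.1.toList).length := by
        simp only [List.length_take]; omega
      have h2 : (List.take cs.length p.1.toList)[k]'h1 = p.1.toList[k]'(by omega) :=
        List.getElem_take
      rw [← h2]
      exact List.getElem_mem h1
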